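-- pv_equiv track=rewrite | github.com/httpvieve/comp-prog | misc/stack-league/practice/singleDIgitSum.py | singleDigitSum
-- ===== SOURCE A (Python) =====
-- def singleDigitSum(sdg, max, idx):
--         key = []
--
--         for i in range (sdg, max):
--                 phrase = str(i)
--                 while len (phrase) > 1:
--                         count = 0
--                         for digit in phrase:
--                                 count += int(digit)
--                         phrase = str(count)
--
--                 if int(phrase) == sdg:
--                         key.append(i)
--
--         if len(key) >= idx:
--                 return key[idx - 1]
--         else:
--                 return -1
-- ===== SOURCE B (Python) =====
-- def singleDigitSum(sdg, max, idx):
--     # The repeated digit sum (digital root) of i is 0 for i == 0 and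
--     # 1 + (i - 1) % 9 for i >= 1, so the numbers in [sdg, max) whose digital
--     # root equals sdg form the arithmetic progression sdg, sdg+9, sdg+18, ...
--     # (when 1 <= sdg <= 9), just [0] (when sdg == 0), or nothing otherwise.
--     if 1 <= sdg <= 9:
--         cand = sdg + 9 * (idx - 1)
--         return cand if cand < max else -1
--     if sdg == 0:
--         return 0 if idx == 1 and max > 0 else -1
--     return -1
-- ===== Notes on version B (the rewrite author's own statement) =====
-- stated objective: faster
-- what changed: Replaces the per-number repeated digit-sum scan over range(sdg, max) with the digital-root closed form 1+(i-1)%9: the qualifying numbers are an arithmetic progression with step 9, so the idx-th one is sdg+9*(idx-1), returned after a bound check; intended as faster (O(1) vs O((max-sdg)log max)) — a timing run measured up to ~440x on inputs with a long range, ~1x where the range is empty.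
-- outside the precondition, e.g. on singleDigitSum(3, 30, 0): A returns 21, B returns -6; on singleDigitSum(3, 30, -1): A returns 12, B returns -15; on singleDigitSum(-2, 5, 1): A raises ValueError, B returns -1
import Mathlib
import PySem

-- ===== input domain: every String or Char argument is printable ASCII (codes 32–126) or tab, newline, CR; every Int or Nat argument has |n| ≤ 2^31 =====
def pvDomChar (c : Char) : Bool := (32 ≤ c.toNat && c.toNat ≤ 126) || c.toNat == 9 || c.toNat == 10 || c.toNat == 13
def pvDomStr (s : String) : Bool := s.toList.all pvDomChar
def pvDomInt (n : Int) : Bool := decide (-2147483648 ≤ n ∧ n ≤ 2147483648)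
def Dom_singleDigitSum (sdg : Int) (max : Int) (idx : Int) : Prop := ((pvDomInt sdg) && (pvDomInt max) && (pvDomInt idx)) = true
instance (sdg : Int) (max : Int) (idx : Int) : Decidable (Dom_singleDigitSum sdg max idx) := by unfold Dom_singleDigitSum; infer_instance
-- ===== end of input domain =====

-- B replaces A's scan of range(sdg, max) with repeated digit-sum reduction by the
-- digital-root closed form (the qualifying numbers are an arithmetic progression
-- with step 9), returning the idx-th member directly; intended as faster (closed
-- form instead of a scan; a timing run measured ~440x on long ranges, ~1x on
-- inputs whose range is empty).

-- ===== PORT A =====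
-- int(digit) for one char; on admitted inputs (i ≥ 0) every char of str(i) is a
-- decimal digit, so ofChars? is some there and .getD 0 is exact
def pvDigitVal (c : Char) : Int := (PySem.Int.ofChars? [c]).getD 0

-- 'count = 0; for digit in phrase: count += int(digit)'
def pvCount (phrase : List Char) : Int := phrase.foldl (fun acc d => acc + pvDigitVal d) 0

-- the 'while len(phrase) > 1' loop, with fuel; for phrase = str(i) with i ≥ 0 the
-- digit sum strictly decreases the value, so fuel i+1 makes this exact
def pvWhile : Nat → List Char → List Char
  | 0, p => p
  | f+1, p => if p.length > 1 then pvWhile f (PySem.Int.toChars (pvCount p)) else p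

def singleDigitSum (sdg : Int) (max : Int) (idx : Int) : Int :=
  let key := (PySem.List.pyRange sdg max 1).foldl
    (fun key i =>
      let phrase := pvWhile (i.natAbs + 1) (PySem.Int.toChars i)
      -- 'if int(phrase) == sdg: key.append(i)'; phrase is all digits on admitted inputs
      if (PySem.Int.ofChars? phrase).getD 0 == sdg then key ++ [i] else key) []
  -- 'key[idx - 1]'; Pre_ keeps idx ≥ 1 and A's guard gives idx - 1 < len(key),
  -- so the index is in range and pyGetD's default is never used
  if (key.length : Int) ≥ idx then PySem.List.pyGetD key (idx - 1) 0 else -1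

-- ===== PORT B =====
def singleDigitSum_alt (sdg : Int) (max : Int) (idx : Int) : Int :=
  if 1 ≤ sdg ∧ sdg ≤ 9 then
    let cand := sdg + 9 * (idx - 1)
    if cand < max then cand else -1
  else if sdg = 0 then
    if idx = 1 ∧ 0 < max then 0 else -1
  else -1

-- ===== PRECONDITION & SPEC =====
-- Pre_ excludes idx ≤ 0 (there A either raises IndexError on an empty key list or
-- returns an element picked by Python's negative-index wraparound, a corner no
-- caller of 'the idx-th number' would specify) and sdg < 0 with sdg < max (there
-- A raises ValueError on int('-') while summing the digits of a negative number).
def Pre_singleDigitSum (sdg : Int) (max : Int) (idx : Int) : Prop :=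
  1 ≤ idx ∧ (0 ≤ sdg ∨ max ≤ sdg)
instance (sdg : Int) (max : Int) (idx : Int) : Decidable (Pre_singleDigitSum sdg max idx) := by unfold Pre_singleDigitSum; infer_instance

def pvWitness_singleDigitSum : Int × Int × Int := (3, 30, 2)

def Spec_singleDigitSum (sdg : Int) (max : Int) (idx : Int) (out : Int) : Prop := out = singleDigitSum_alt sdg max idx
instance (sdg : Int) (max : Int) (idx : Int) (out : Int) : Decidable (Spec_singleDigitSum sdg max idx out) := by unfold Spec_singleDigitSum; infer_instance

-- ===== CLAIM (what is proved, stated in full; the proofs are below) =====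
def Claim_equal_singleDigitSum : Prop := ∀ (sdg : Int) (max : Int) (idx : Int), Dom_singleDigitSum sdg max idx → Pre_singleDigitSum sdg max idx → Spec_singleDigitSum sdg max idx (singleDigitSum sdg max idx)

-- ===== LEMMAS AND PROOFS =====

-- the digital root in closed form
def pvDroot (n : Nat) : Nat := if n = 0 then 0 else (n - 1) % 9 + 1

lemma pvDroot_small (n : Nat) (h : n ≤ 9) : pvDroot n = n := by
  unfold pvDroot; split <;> omega

lemma pvDroot_le (n : Nat) : pvDroot n ≤ 9 := by
  unfold pvDroot; split <;> omega

lemma pvDroot_congr (m n : Nat) (hm : 0 < m) (hn : 0 < n) (h : m % 9 = n % 9) :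
    pvDroot m = pvDroot n := by unfold pvDroot; split <;> split <;> omega

lemma toDigits_small (n : Nat) (h : n ≤ 9) : Nat.toDigits 10 n = [Nat.digitChar n] := by
  interval_cases n <;> rfl

lemma toDigitsCore_eq (f : Nat) : ∀ (n : Nat) (ds : List Char), 0 < n → n < f →
    Nat.toDigitsCore 10 f n ds = ((Nat.digits 10 n).map Nat.digitChar).reverse ++ ds := by
  induction f with
  | zero => intro n ds h hf; omega
  | succ f ih =>
    intro n ds h hf
    rw [Nat.toDigitsCore]
    rw [Nat.digits_def' (by norm_num : (1:Nat) < 10) h]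
    by_cases h10 : n / 10 = 0
    · simp [h10, Nat.digits_zero]
    · rw [if_neg h10, ih (n / 10) _ (by omega) (by omega)]
      rw [Nat.digits_def'] <;> try omega
      simp
lemma toDigits_eq (n : Nat) (h : 0 < n) :
    Nat.toDigits 10 n = ((Nat.digits 10 n).map Nat.digitChar).reverse := by
  rw [Nat.toDigits, toDigitsCore_eq (n+1) n [] h (by omega), List.append_nil]

lemma digitVal_digitChar (d : Nat) (h : d < 10) : pvDigitVal (Nat.digitChar d) = (d : Int) := by
  interval_cases d <;> decide

lemma foldl_add_digitVal (l : List Char) (a : Int) :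
    l.foldl (fun acc d => acc + pvDigitVal d) a = a + (l.map pvDigitVal).sum := by
  induction l generalizing a with
  | nil => simp
  | cons c l ih => simp [ih]; ring

lemma count_toDigits (n : Nat) : pvCount (Nat.toDigits 10 n) = ((Nat.digits 10 n).sum : Int) := by
  rcases Nat.eq_zero_or_pos n with h0 | hpos
  · subst h0; decide
  · rw [toDigits_eq n hpos]
    unfold pvCount
    rw [foldl_add_digitVal]
    rw [List.map_reverse, List.sum_reverse, List.map_map, Nat.cast_list_sum, zero_add]
    refine congrArg List.sum (List.map_congr_left ?_)
    intro d hd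
    exact digitVal_digitChar d (Nat.digits_lt_base (by norm_num) hd)

lemma digits_sum_le (n : Nat) : (Nat.digits 10 n).sum ≤ n := by
  induction n using Nat.strong_induction_on with
  | _ n ih =>
    rcases Nat.eq_zero_or_pos n with h0 | hpos
    · simp [h0]
    · rw [Nat.digits_def' (by norm_num : (1:Nat) < 10) hpos]
      have := ih (n / 10) (by omega)
      simp only [List.sum_cons]
      omega

lemma digits_sum_pos (n : Nat) (h : 0 < n) : 0 < (Nat.digits 10 n).sum := by
  induction n using Nat.strong_induction_on with
  | _ n ih =>
    rw [Nat.digits_def' (by norm_num : (1:Nat) < 10) h]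
    simp only [List.sum_cons]
    by_cases hm : n % 10 = 0
    · have hd : 0 < n / 10 := by omega
      have := ih (n / 10) (by omega) hd
      omega
    · omega

lemma digits_sum_mod9 (n : Nat) : (Nat.digits 10 n).sum % 9 = n % 9 :=
  (Nat.modEq_digits_sum 9 10 (by norm_num) n).symm

lemma toDigits_len_two (n : Nat) (h : 10 ≤ n) : 1 < (Nat.toDigits 10 n).length := by
  rw [toDigits_eq n (by omega)]
  simp only [List.length_reverse, List.length_map]
  by_contra hle
  have h1 : (Nat.digits 10 n).length ≤ 1 := by omega
  have := @Nat.lt_base_pow_length_digits 10 n (by norm_num)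
  have : n < 10 ^ 1 := lt_of_lt_of_le this (Nat.pow_le_pow_right (by norm_num) h1)
  omega

lemma toDigits_len_one (n : Nat) (h : n ≤ 9) : (Nat.toDigits 10 n).length = 1 := by
  rw [toDigits_small n h]; rfl

lemma while_eval (f : Nat) : ∀ n : Nat, n ≤ f →
    pvWhile f (Nat.toDigits 10 n) = Nat.toDigits 10 (pvDroot n) := by
  induction f with
  | zero =>
    intro n h
    have : n = 0 := by omega
    subst this; rfl
  | succ f ih =>
    intro n h
    by_cases h9 : n ≤ 9
    · rw [pvWhile, if_neg (by rw [toDigits_len_one n h9]; omega), pvDroot_small n h9]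
    · rw [pvWhile, if_pos (by simpa using toDigits_len_two n (by omega))]
      rw [count_toDigits]
      have hcast : ∀ s : Nat, PySem.Int.toChars ((s : Nat) : Int) = Nat.toDigits 10 s := by
        intro s
        unfold PySem.Int.toChars
        rw [if_neg (by omega)]
        simp
      rw [hcast]
      have hlt : (Nat.digits 10 n).sum < n := by
        have := digits_sum_le (n / 10)
        rw [Nat.digits_def' (by norm_num : (1:Nat) < 10) (by omega : 0 < n)]
        simp only [List.sum_cons]
        omega
      rw [ih _ (by omega)]
      congr 1
      exact pvDroot_congr _ _ (digits_sum_pos n (by omega)) (by omega) (digits_sum_mod9 n)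

lemma ofChars_toDigits_small (n : Nat) (h : n ≤ 9) :
    PySem.Int.ofChars? (Nat.toDigits 10 n) = some (n : Int) := by
  interval_cases n <;> decide

-- the per-element test of A's loop computes the digital root
lemma body_cond (sdg i : Int) (hi : 0 ≤ i) :
    ((PySem.Int.ofChars? (pvWhile (i.natAbs + 1) (PySem.Int.toChars i))).getD 0 == sdg)
      = ((pvDroot i.toNat : Int) == sdg) := by
  have h1 : PySem.Int.toChars i = Nat.toDigits 10 i.toNat := by
    unfold PySem.Int.toChars
    rw [if_neg (by omega)]
  rw [h1, while_eval (i.natAbs + 1) i.toNat (by omega),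
    ofChars_toDigits_small _ (pvDroot_le i.toNat)]
  rfl

-- the elements of [a, b) congruent to r mod 9 are an arithmetic progression
lemma filter_mod9 (t : Nat) : ∀ a b r : Int, (b - a).toNat = t →
    (PySem.List.pyRange a b 1).filter (fun i => i % 9 == r % 9)
      = (List.range (((b - (a + (r - a) % 9)).toNat + 8) / 9)).map
          (fun k : Nat => (a + (r - a) % 9) + 9 * (k : Int)) := by
  induction t with
  | zero =>
    intro a b r ht
    rw [PySem.List.pyRange_one_eq_nil (by omega)]
    have : ((b - (a + (r - a) % 9)).toNat + 8) / 9 = 0 := by omega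
    simp [this]
  | succ t ih =>
    intro a b r ht
    rw [PySem.List.pyRange_one_cons (by omega : a < b), List.filter_cons]
    have hrec := ih (a + 1) b r (by omega)
    by_cases hm : a % 9 = r % 9
    · rw [if_pos (by simpa using hm), hrec]
      have hc : (a + 1) + (r - (a + 1)) % 9 = a + 9 := by omega
      have hc0 : a + (r - a) % 9 = a := by omega
      rw [hc, hc0]
      have hm9 : ((b - a).toNat + 8) / 9 = ((b - (a + 9)).toNat + 8) / 9 + 1 := by omega
      rw [hm9, List.range_succ_eq_map, List.map_cons, List.map_map]
      congr 1
      · simp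
      · refine List.map_congr_left ?_
        intro k _
        simp [Function.comp, Nat.succ_eq_add_one]
        ring
    · rw [if_neg (by simpa using hm), hrec]
      have hc : (a + 1) + (r - (a + 1)) % 9 = a + (r - a) % 9 := by omega
      rw [hc]

-- A's key list, in closed form, for 0 ≤ sdg
lemma key_closed (sdg max : Int) (hs : 0 ≤ sdg) :
    ((PySem.List.pyRange sdg max 1).foldl
      (fun key i =>
        if (PySem.Int.ofChars? (pvWhile (i.natAbs + 1) (PySem.Int.toChars i))).getD 0 == sdg
        then key ++ [i] else key) [])
      = (PySem.List.pyRange sdg max 1).filter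
          (fun i => (pvDroot i.toNat : Int) == sdg) := by
  rw [PySem.List.foldl_append_if_eq_filter
    (fun i => (PySem.Int.ofChars? (pvWhile (i.natAbs + 1) (PySem.Int.toChars i))).getD 0 == sdg)]
  rw [List.nil_append]
  apply List.filter_congr
  intro i hi
  have : sdg ≤ i ∧ i < max := PySem.List.mem_pyRange_one.mp hi
  exact body_cond sdg i (by omega)

-- ===== VERDICT (by name: the statement is the Claim_ definition above) =====
theorem singleDigitSum_spec : Claim_equal_singleDigitSum := by
  intro sdg max idx _hdom hpre
  obtain ⟨hidx, hsd⟩ := hpre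
  unfold Spec_singleDigitSum singleDigitSum singleDigitSum_alt
  rcases hsd with hs0 | hmax
  · -- 0 ≤ sdg
    rw [key_closed sdg max hs0]
    by_cases h19 : 1 ≤ sdg ∧ sdg ≤ 9
    · -- the progression case
      have hfilt : (PySem.List.pyRange sdg max 1).filter
          (fun i => (pvDroot i.toNat : Int) == sdg)
          = (PySem.List.pyRange sdg max 1).filter (fun i : Int => i % 9 == sdg % 9) := by
        apply List.filter_congr
        intro i hi
        have hmem : sdg ≤ i ∧ i < max := PySem.List.mem_pyRange_one.mp hi
        have hd9 : pvDroot i.toNat ≤ 9 := pvDroot_le i.toNat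
        have : (pvDroot i.toNat : Int) = sdg ↔ i % 9 = sdg % 9 := by
          unfold pvDroot
          split <;> omega
        apply Bool.eq_iff_iff.mpr
        simp only [beq_iff_eq]
        exact this
      rw [hfilt, filter_mod9 (max - sdg).toNat sdg max sdg rfl]
      have hc0 : sdg + (sdg - sdg) % 9 = sdg := by omega
      rw [hc0]
      set m : Nat := ((max - sdg).toNat + 8) / 9 with hm
      rw [if_pos h19]
      simp only [List.length_map, List.length_range]
      by_cases hge : (m : Int) ≥ idx
      · rw [if_pos hge]
        have hlt : idx - 1 < (((List.range m).map (fun k : Nat => sdg + 9 * (k : Int))).length : Int) := by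
          simp; omega
        rw [PySem.List.pyGetD_eq_getElem _ _ (by omega) hlt]
        have hkm : (idx - 1).toNat < m := by omega
        simp only [List.getElem_map, List.getElem_range]
        rw [if_pos (by omega : sdg + 9 * (idx - 1) < max)]
        omega
      · rw [if_neg hge, if_neg (by omega : ¬ sdg + 9 * (idx - 1) < max)]
    · rw [if_neg h19]
      by_cases hz : sdg = 0
      · subst hz
        by_cases hmx : 0 < max
        · have hcons : PySem.List.pyRange 0 max 1 = 0 :: PySem.List.pyRange 1 max 1 :=
            PySem.List.pyRange_one_cons (by omega)
          have htail : (PySem.List.pyRange 1 max 1).filter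
              (fun i => (pvDroot i.toNat : Int) == (0:Int)) = [] := by
            rw [List.filter_eq_nil_iff]
            intro i hi
            have hmem : 1 ≤ i ∧ i < max := PySem.List.mem_pyRange_one.mp hi
            simp only [beq_iff_eq]
            unfold pvDroot
            split <;> omega
          have hkey : (PySem.List.pyRange 0 max 1).filter
              (fun i => (pvDroot i.toNat : Int) == (0:Int)) = [0] := by
            rw [hcons, List.filter_cons, htail, if_pos (by decide)]
          rw [hkey]
          simp only [List.length_cons, List.length_nil]
          by_cases h1 : idx = 1
          · subst h1
            rw [if_pos (show ((1:Nat):Int) ≥ 1 by norm_num),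
              if_pos (show (1:Int) = 1 ∧ 0 < max from ⟨rfl, hmx⟩)]
            decide
          · rw [if_neg (show ¬(((1:Nat):Int) ≥ idx) by push_cast; omega),
              if_neg (show ¬(idx = 1 ∧ 0 < max) from fun hc => h1 hc.1)]
            simp
        · rw [PySem.List.pyRange_one_eq_nil (by omega), if_pos rfl,
            if_neg (show ¬(idx = 1 ∧ 0 < max) from fun hc => hmx hc.2)]
          simp only [List.filter_nil, List.length_nil]
          rw [if_neg (by omega)]
      · -- sdg ≥ 10
        have hfilt : (PySem.List.pyRange sdg max 1).filter
            (fun i => (pvDroot i.toNat : Int) == sdg) = [] := by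
          rw [List.filter_eq_nil_iff]
          intro i hi
          have hd9 : pvDroot i.toNat ≤ 9 := pvDroot_le i.toNat
          simp only [beq_iff_eq]
          omega
        rw [hfilt, if_neg hz]
        simp only [List.length_nil]
        rw [if_neg (by omega)]
  · -- max ≤ sdg : the range is empty
    rw [PySem.List.pyRange_one_eq_nil (by omega)]
    simp only [List.foldl_nil, List.length_nil]
    rw [if_neg (by omega)]
    by_cases h19 : 1 ≤ sdg ∧ sdg ≤ 9
    · rw [if_pos h19, if_neg (by omega)]
    · rw [if_neg h19]
      by_cases hz : sdg = 0
      · rw [if_pos hz, if_neg (by rintro ⟨-, h⟩; omega)]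
      · rw [if_neg hz]
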